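-- pv_equiv track=rewrite | github.com/migarn/algorithmics | Encrypting/Encrypting.py | decypherString
-- ===== SOURCE A (Python) =====
-- import string
--
-- def decypherString(stringToDecypher, key):
--     letters = list(string.ascii_uppercase)
--     letters.extend(letters)
--     letters.reverse()
--     key = str(key)
--     stringToDecypher = stringToDecypher.upper()
--     decypheredString = ""
--
--     keyIndex = 0
--
--     for char in stringToDecypher:
--         decypheredString += letters[letters.index(char) + int(key[keyIndex])]
--         keyIndex += 1
--         if keyIndex == len(key):
--             keyIndex = 0
--
--     return decypheredString
-- ===== SOURCE B (Python) =====
-- import string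
--
-- def decypherString(stringToDecypher, key):
--     key = str(key)
--     s = stringToDecypher.upper()
--     n = len(key)
--     up = string.ascii_uppercase
--     pieces = []
--     for j in range(min(n, len(s))):
--         d = int(key[j])
--         tbl = str.maketrans(up, up[-d:] + up[:-d])
--         pieces.append(s[j::n].translate(tbl))
--     out = [""] * len(s)
--     for j in range(len(pieces)):
--         out[j::n] = pieces[j]
--     return "".join(out)
-- ===== Notes on version B (the rewrite author's own statement) =====
-- stated objective: alternative
-- what changed: Replaces A's per-character loop with cycling key index and a reversed doubled-alphabet .index scan by a stride decomposition: one rotation translation table per key position, each slice s[j::len(key)] decoded in bulk with str.translate, and the decoded slices interleaved back by slice assignment.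
import Mathlib
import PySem

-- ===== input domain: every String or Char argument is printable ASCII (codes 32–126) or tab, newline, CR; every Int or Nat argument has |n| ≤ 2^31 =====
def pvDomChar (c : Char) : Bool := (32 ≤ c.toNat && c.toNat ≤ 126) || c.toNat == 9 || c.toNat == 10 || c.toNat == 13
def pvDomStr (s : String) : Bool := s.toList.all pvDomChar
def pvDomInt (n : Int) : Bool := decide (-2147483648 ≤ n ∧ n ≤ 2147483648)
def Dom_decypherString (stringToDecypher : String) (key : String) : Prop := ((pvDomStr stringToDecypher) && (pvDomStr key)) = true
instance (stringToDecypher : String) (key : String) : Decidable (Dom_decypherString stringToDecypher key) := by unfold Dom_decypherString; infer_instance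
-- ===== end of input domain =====

-- B replaces A's per-character loop (cycling key counter + reversed doubled-alphabet .index scan)
-- by a stride decomposition: one rotation translation table per key position, each slice
-- s[j::len(key)] decoded in bulk with translate, then the slices interleaved back (objective: alternative).

-- ===== PORT A =====
-- string.ascii_uppercase as a list of characters
def pvAsciiUppercase : List Char :=
  ['A','B','C','D','E','F','G','H','I','J','K','L','M','N','O','P','Q','R','S','T','U','V','W','X','Y','Z']

-- letters = list(string.ascii_uppercase); letters.extend(letters); letters.reverse()
def pvLetters : List Char := (pvAsciiUppercase ++ pvAsciiUppercase).reverse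

-- one iteration of A's for-loop: state = (decypheredString as char list, keyIndex)
def pvStepA (kl : List Char) (st : List Char × Nat) (c : Char) : List Char × Nat :=
  let d := (PySem.Int.ofChars? [(PySem.List.pyGet? kl ((st.2 : Int))).getD ' ']).getD 0
  let ch := (PySem.List.pyGet? pvLetters
      ((((PySem.List.index? pvLetters c).getD 0 : Nat) : Int) + d)).getD ' '
  (st.1 ++ [ch], if st.2 + 1 = kl.length then 0 else st.2 + 1)

def decypherString (stringToDecypher : String) (key : String) : String :=
  String.ofList (((PySem.Str.upper stringToDecypher).toList.foldl
    (pvStepA key.toList) ([], 0)).1)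

-- ===== PORT B =====
-- s[j::n] for n ≥ 1 is List.drop j followed by pvEveryNth n: take one element, skip n-1, repeat.
-- Exact transcription of an extended slice with positive step and start j < n.
def pvEveryNth (n : Nat) : List Char → List Char
  | [] => []
  | c :: rest => c :: pvEveryNth n (rest.drop (n - 1))
termination_by xs => xs.length
decreasing_by simp [List.length_drop]

-- str.maketrans(up, up[-d:] + up[:-d]): a map from each uppercase letter to its rotation;
-- exact here since the 26 source characters are distinct.
def pvRotTable (d : Int) : PySem.Dict Char Char :=
  PySem.Dict.ofList (pvAsciiUppercase.zip
    (PySem.List.slice pvAsciiUppercase (some (-d)) none ++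
     PySem.List.slice pvAsciiUppercase none (some (-d))))

-- str.translate: look each character up in the table, identity fallback (exact for this table)
def pvTranslate (tbl : PySem.Dict Char Char) (cs : List Char) : List Char :=
  cs.map (fun c => (tbl.get? c).getD c)

-- pieces: for j in range(min(n, len(s))): d = int(key[j]); pieces.append(s[j::n].translate(tbl(d)))
def pvPieces (kl u : List Char) : List (List Char) :=
  (List.range (min kl.length u.length)).map (fun j =>
    pvTranslate (pvRotTable ((PySem.Int.ofChars? [kl.getD j ' ']).getD 0))
      (pvEveryNth kl.length (u.drop j)))

def decypherString_alt (stringToDecypher : String) (key : String) : String :=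
  -- out = [""] * len(s); out[j::n] = pieces[j]; "".join(out): slot i holds the one-char string
  -- written by slice j = i % n at offset i / n if that slice exists, else the initial "" —
  -- exact transcription of the slice assignments followed by the join.
  String.ofList ((List.range (PySem.Str.upper stringToDecypher).toList.length).flatMap (fun i =>
    if i % key.toList.length < (pvPieces key.toList (PySem.Str.upper stringToDecypher).toList).length
    then [((pvPieces key.toList (PySem.Str.upper stringToDecypher).toList).getD
        (i % key.toList.length) []).getD (i / key.toList.length) ' ']
    else []))

-- ===== PRECONDITION & SPEC =====
-- Pre_ excludes exactly the inputs on which A raises: a character whose uppercase form is not an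
-- ASCII letter (ValueError from letters.index), and — when the input string is nonempty — an empty
-- key (IndexError) or a non-digit among the key characters A actually reads (ValueError from int()).
def Pre_decypherString (stringToDecypher : String) (key : String) : Prop :=
  (stringToDecypher.toList.all
      (fun c => (decide (65 ≤ c.toNat) && decide (c.toNat ≤ 90))
        || (decide (97 ≤ c.toNat) && decide (c.toNat ≤ 122)))
    && (stringToDecypher.toList.isEmpty
      || (!key.toList.isEmpty
        && (List.range (min stringToDecypher.toList.length key.toList.length)).all
            (fun j => decide (48 ≤ (key.toList.getD j ' ').toNat)
              && decide ((key.toList.getD j ' ').toNat ≤ 57))))) = true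
instance (stringToDecypher : String) (key : String) : Decidable (Pre_decypherString stringToDecypher key) := by
  unfold Pre_decypherString; infer_instance

def pvWitness_decypherString : String × String := ("AB", "12")

def Spec_decypherString (stringToDecypher : String) (key : String) (out : String) : Prop := out = decypherString_alt stringToDecypher key
instance (stringToDecypher : String) (key : String) (out : String) : Decidable (Spec_decypherString stringToDecypher key out) := by unfold Spec_decypherString; infer_instance

-- ===== CLAIM (what is proved, stated in full; the proofs are below) =====
def Claim_equal_decypherString : Prop := ∀ (stringToDecypher : String) (key : String), Dom_decypherString stringToDecypher key → Pre_decypherString stringToDecypher key → Spec_decypherString stringToDecypher key (decypherString stringToDecypher key)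

-- ===== LEMMAS AND PROOFS =====

-- the character A's loop body appends, as a function of the input char and the key char used
def pvCharA (c k : Char) : Char :=
  (PySem.List.pyGet? pvLetters
      ((((PySem.List.index? pvLetters c).getD 0 : Nat) : Int) + (PySem.Int.ofChars? [k]).getD 0)).getD ' '

-- the character both programs produce from input char c and key char k, in closed form
def pvCharB (c k : Char) : Char :=
  Char.ofNat ((PySem.Int.mod ((c.toNat : Int) - 65 - (PySem.Int.ofChars? [k]).getD 0) 26 + 65).toNat)

theorem pvCharAB_nat : ∀ a < 26, ∀ d < 10,
    pvCharA (Char.ofNat (65 + a)) (Char.ofNat (48 + d))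
      = pvCharB (Char.ofNat (65 + a)) (Char.ofNat (48 + d)) := by decide

theorem pvCharAB (c k : Char) (hc : 65 ≤ c.toNat ∧ c.toNat ≤ 90)
    (hk : 48 ≤ k.toNat ∧ k.toNat ≤ 57) : pvCharA c k = pvCharB c k := by
  have h := pvCharAB_nat (c.toNat - 65) (by omega) (k.toNat - 48) (by omega)
  have hc' : Char.ofNat (65 + (c.toNat - 65)) = c := by
    rw [show 65 + (c.toNat - 65) = c.toNat by omega, Char.ofNat_toNat]
  have hk' : Char.ofNat (48 + (k.toNat - 48)) = k := by
    rw [show 48 + (k.toNat - 48) = k.toNat by omega, Char.ofNat_toNat]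
  rwa [hc', hk'] at h

-- B's table lookup agrees with pvCharB on uppercase letters and digit key chars
theorem pvTblB_nat : ∀ a < 26, ∀ d < 10,
    (((pvRotTable ((PySem.Int.ofChars? [Char.ofNat (48 + d)]).getD 0)).get?
        (Char.ofNat (65 + a))).getD (Char.ofNat (65 + a)))
      = pvCharB (Char.ofNat (65 + a)) (Char.ofNat (48 + d)) := by decide

theorem pvTblB (c k : Char) (hc : 65 ≤ c.toNat ∧ c.toNat ≤ 90)
    (hk : 48 ≤ k.toNat ∧ k.toNat ≤ 57) :
    (((pvRotTable ((PySem.Int.ofChars? [k]).getD 0)).get? c).getD c) = pvCharB c k := by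
  have h := pvTblB_nat (c.toNat - 65) (by omega) (k.toNat - 48) (by omega)
  have hc' : Char.ofNat (65 + (c.toNat - 65)) = c := by
    rw [show 65 + (c.toNat - 65) = c.toNat by omega, Char.ofNat_toNat]
  have hk' : Char.ofNat (48 + (k.toNat - 48)) = k := by
    rw [show 48 + (k.toNat - 48) = k.toNat by omega, Char.ofNat_toNat]
  rwa [hc', hk'] at h

theorem pvUpperChar_bounds_nat : ∀ n < 123, 65 ≤ n → (n ≤ 90 ∨ 97 ≤ n) →
    65 ≤ (PySem.Chars.upperChar (Char.ofNat n)).toNat ∧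
      (PySem.Chars.upperChar (Char.ofNat n)).toNat ≤ 90 := by decide

theorem pvUpperChar_bounds (c : Char)
    (h : (65 ≤ c.toNat ∧ c.toNat ≤ 90) ∨ (97 ≤ c.toNat ∧ c.toNat ≤ 122)) :
    65 ≤ (PySem.Chars.upperChar c).toNat ∧ (PySem.Chars.upperChar c).toNat ≤ 90 := by
  have h' := pvUpperChar_bounds_nat c.toNat (by omega) (by omega) (by omega)
  rwa [Char.ofNat_toNat] at h'

-- A's loop, characterised pointwise over List.range
theorem pvLoop_eq (kl : List Char) (hk : 0 < kl.length) (N : Nat)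
    (hdig : ∀ j, j < N → j < kl.length →
      48 ≤ (kl.getD j ' ').toNat ∧ (kl.getD j ' ').toNat ≤ 57) :
    ∀ (u : List Char) (i : Nat) (acc : List Char),
      i + u.length ≤ N →
      (∀ c ∈ u, 65 ≤ c.toNat ∧ c.toNat ≤ 90) →
      (u.foldl (pvStepA kl) (acc, i % kl.length)).1
        = acc ++ (List.range u.length).map
            (fun q => pvCharB (u.getD q ' ') (kl.getD ((i + q) % kl.length) ' ')) := by
  intro u
  induction u with
  | nil => intro i acc _ _; simp
  | cons c u ih =>
    intro i acc hN hup
    simp only [List.foldl_cons]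
    have hr : i % kl.length < kl.length := Nat.mod_lt _ hk
    have hiN : i < N := by rw [List.length_cons] at hN; omega
    have hmodle : i % kl.length ≤ i := Nat.mod_le i kl.length
    have hkeyA : PySem.List.pyGet? kl ((i % kl.length : Nat) : Int) = kl[i % kl.length]? :=
      PySem.List.pyGet?_natCast kl (i % kl.length)
    have hget : kl[i % kl.length]?.getD ' ' = kl.getD (i % kl.length) ' ' :=
      List.getD_eq_getElem?_getD.symm
    have hdigit := hdig (i % kl.length) (by omega) hr
    have hchar : pvStepA kl (acc, i % kl.length) c
        = (acc ++ [pvCharB c (kl.getD (i % kl.length) ' ')],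
           if i % kl.length + 1 = kl.length then 0 else i % kl.length + 1) := by
      have h0 : pvStepA kl (acc, i % kl.length) c
          = (acc ++ [pvCharA c (kl.getD (i % kl.length) ' ')],
             if i % kl.length + 1 = kl.length then 0 else i % kl.length + 1) := by
        simp only [pvStepA, pvCharA, hkeyA, hget]
      rw [h0, pvCharAB c _ (hup c (List.mem_cons_self ..)) hdigit]
    have hki : (if i % kl.length + 1 = kl.length then 0 else i % kl.length + 1)
        = (i + 1) % kl.length := by
      have h1 : (i + 1) % kl.length = (i % kl.length + 1) % kl.length := by
        conv_lhs => rw [← Nat.mod_add_mod]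
      by_cases h : i % kl.length + 1 = kl.length
      · rw [if_pos h, h1, h, Nat.mod_self]
      · rw [if_neg h, h1]
        exact (Nat.mod_eq_of_lt (by omega)).symm
    rw [hchar, hki,
      ih (i + 1) (acc ++ [pvCharB c (kl.getD (i % kl.length) ' ')])
        (by rw [List.length_cons] at hN; omega)
        (fun x hx => hup x (List.mem_cons_of_mem _ hx))]
    rw [List.length_cons, List.range_succ_eq_map, List.map_cons, List.map_map]
    have hfun : ((fun q => pvCharB ((c :: u).getD q ' ') (kl.getD ((i + q) % kl.length) ' '))
          ∘ (fun q => q + 1))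
        = (fun q => pvCharB (u.getD q ' ') (kl.getD ((i + 1 + q) % kl.length) ' ')) := by
      funext q
      simp only [Function.comp, List.getD_cons_succ]
      rw [show i + (q + 1) = i + 1 + q by omega]
    rw [hfun]
    simp [List.append_assoc]

-- element q of s[j::n] (n ≥ 1) is element q*n of the dropped list
theorem pvEveryNth_getElem? (n : Nat) (hn : 1 ≤ n) :
    ∀ (q : Nat) (xs : List Char), (pvEveryNth n xs)[q]? = xs[q * n]? := by
  intro q
  induction q with
  | zero =>
    intro xs
    cases xs with
    | nil => simp [pvEveryNth]
    | cons c rest => simp [pvEveryNth]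
  | succ q ih =>
    intro xs
    cases xs with
    | nil => simp [pvEveryNth]
    | cons c rest =>
      rw [show (q + 1) * n = (n - 1 + q * n) + 1 by
        have h : (q + 1) * n = q * n + n := by ring
        omega]
      simp only [pvEveryNth, List.getElem?_cons_succ]
      rw [ih, List.getElem?_drop]

-- a flatMap whose pieces are singletons is a map
theorem pvFlatMapEq (l : List Nat) (f : Nat → List Char) (g : Nat → Char)
    (h : ∀ i ∈ l, f i = [g i]) : l.flatMap f = l.map g := by
  induction l with
  | nil => simp
  | cons a l ih =>
    simp [h a (List.mem_cons_self ..), ih (fun i hi => h i (List.mem_cons_of_mem _ hi))]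

-- element i of the reassembled output: slice i % n, offset i / n, is the translation of u[i]
theorem pvTranslate_stride (tbl : PySem.Dict Char Char) (n : Nat) (hn : 0 < n)
    (u : List Char) (i : Nat) (hi : i < u.length) :
    (pvTranslate tbl (pvEveryNth n (u.drop (i % n)))).getD (i / n) ' '
      = (tbl.get? (u.getD i ' ')).getD (u.getD i ' ') := by
  have hoff : i % n + i / n * n = i := by
    have := Nat.mod_add_div i n
    have h2 : n * (i / n) = i / n * n := Nat.mul_comm ..
    omega
  unfold pvTranslate
  rw [List.getD_eq_getElem?_getD, List.getElem?_map, pvEveryNth_getElem? n hn,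
    List.getElem?_drop, hoff, List.getElem?_eq_getElem hi]
  rw [List.getD_eq_getElem?_getD, List.getElem?_eq_getElem hi]
  rfl

-- ===== VERDICT (by name: the statement is the Claim_ definition above) =====
theorem decypherString_spec : Claim_equal_decypherString := by
  intro s key _ hpre
  unfold Pre_decypherString at hpre
  rw [Bool.and_eq_true] at hpre
  obtain ⟨hlet, hrest⟩ := hpre
  have hletters : ∀ c ∈ s.toList, (65 ≤ c.toNat ∧ c.toNat ≤ 90) ∨ (97 ≤ c.toNat ∧ c.toNat ≤ 122) := by
    intro c hc
    simpa using List.all_eq_true.mp hlet c hc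
  unfold Spec_decypherString decypherString decypherString_alt
  rw [PySem.Str.toList_upper]
  cases hs : s.toList with
  | nil => simp [PySem.Chars.upper, pvPieces]
  | cons c0 rest =>
    rw [hs] at hrest
    simp only [List.isEmpty_cons, Bool.false_or, Bool.and_eq_true, Bool.not_eq_eq_eq_not,
      Bool.not_true, List.isEmpty_eq_false_iff, List.all_eq_true, List.mem_range,
      decide_eq_true_eq] at hrest
    obtain ⟨hne, hdig⟩ := hrest
    have hk : 0 < key.toList.length := List.length_pos_iff.mpr hne
    set kl := key.toList with hkl
    set u := PySem.Chars.upper (c0 :: rest) with hu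
    have hup : ∀ c ∈ u, 65 ≤ c.toNat ∧ c.toNat ≤ 90 := by
      intro c hc
      rw [hu] at hc
      obtain ⟨x, hx, rfl⟩ := List.mem_map.mp hc
      exact pvUpperChar_bounds x (hletters x (hs ▸ hx))
    have hlen : u.length = (c0 :: rest).length := by
      rw [hu]; exact List.length_map ..
    -- A's side
    have hA := pvLoop_eq kl hk u.length
      (fun j hj hjk => hdig j (by omega)) u 0 [] (by omega) hup
    simp only [Nat.zero_mod, Nat.zero_add, List.nil_append] at hA
    rw [hA]
    -- B's side: every slot of the reassembly is a singleton holding the same character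
    congr 1
    have hone : ∀ i ∈ List.range u.length,
        (if i % kl.length < (pvPieces kl u).length
         then [((pvPieces kl u).getD (i % kl.length) []).getD (i / kl.length) ' ']
         else [])
          = [pvCharB (u.getD i ' ') (kl.getD (i % kl.length) ' ')] := by
      intro i hi
      rw [List.mem_range] at hi
      have hjn : i % kl.length < kl.length := Nat.mod_lt _ hk
      have hjm : i % kl.length < min kl.length u.length := by
        have : i % kl.length ≤ i := Nat.mod_le i kl.length
        omega
      have hplen : (pvPieces kl u).length = min kl.length u.length := by
        unfold pvPieces; rw [List.length_map, List.length_range]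
      rw [if_pos (by omega)]
      -- pieces.getD (i % n) [] is the translated stride i % n, element i / n is u[i] translated
      unfold pvPieces
      rw [PySem.List.getD_map_range _ _ _ _ hjm,
        pvTranslate_stride _ kl.length hk u i hi,
        pvTblB (u.getD i ' ') (kl.getD (i % kl.length) ' ')
          (hup _ (by simp [List.getD_eq_getElem?_getD, List.getElem?_eq_getElem hi]))
          (⟨(hdig (i % kl.length) (by omega)).1, (hdig (i % kl.length) (by omega)).2⟩)]
    rw [pvFlatMapEq _ _ _ hone]
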